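-- pv_equiv track=rewrite | github.com/bitshoroscope/google-challenge | src/level_3/fuel_injection_perfection.py | control_mechanism
-- ===== SOURCE A (Python) =====
-- def control_mechanism(n, list):
--     if n % 2 != 0:
--         list.append(n)
--     if n % 2 != 0:
--         n -= 1
--     list.append(n)
--     n //= 2
--     if n == 1:
--         list.append(n)
--         return list
--     else:
--         return control_mechanism(n, list)
-- ===== SOURCE B (Python) =====
-- def control_mechanism(n, list):
--     # Iterative: build the halving chain in a fresh list (one append per step),
--     # then extend the caller's list in place (same mutation as A) and return it.
--     out = []
--     while n > 1:
--         out.append(n)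
--         n = n - 1 if n % 2 else n // 2
--     out.append(1)
--     list.extend(out)
--     return list
-- ===== Notes on version B (the rewrite author's own statement) =====
-- stated objective: simpler
-- what changed: Replaces A's tail recursion with two-appends-per-odd-step by a plain while loop that appends the current value once per step and halves or decrements it, collecting into a fresh list that is extend-ed onto the caller's list at the end.
import Mathlib
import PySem

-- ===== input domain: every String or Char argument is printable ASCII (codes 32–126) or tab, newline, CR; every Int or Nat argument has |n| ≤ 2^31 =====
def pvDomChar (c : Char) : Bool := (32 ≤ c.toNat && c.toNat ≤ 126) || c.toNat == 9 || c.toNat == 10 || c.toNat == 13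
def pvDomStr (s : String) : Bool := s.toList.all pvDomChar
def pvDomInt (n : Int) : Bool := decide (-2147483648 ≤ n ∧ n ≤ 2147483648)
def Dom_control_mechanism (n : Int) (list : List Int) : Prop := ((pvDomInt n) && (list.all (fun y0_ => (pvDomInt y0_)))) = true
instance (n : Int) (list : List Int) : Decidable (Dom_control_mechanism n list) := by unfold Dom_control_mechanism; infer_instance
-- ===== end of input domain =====

-- B replaces A's two-appends-per-odd-step tail recursion by a plain while loop appending
-- one value per step into a fresh list, then extending the caller's list (same in-place
-- mutation as A; the equivalence proved here is about the return value).

-- helper facts cited by the ports' termination proofs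
theorem pv_fdiv2 (n : Int) : PySem.Int.floordiv n 2 = n / 2 :=
  PySem.Int.floordiv_eq_ediv_of_pos (by norm_num)
theorem pv_fmod2 (n : Int) : PySem.Int.mod n 2 = n % 2 :=
  PySem.Int.mod_eq_emod_of_pos (by norm_num)

-- ===== PORT A =====
-- Python A diverges (RecursionError) for n < 2; those inputs are outside Pre_, and the
-- port returns `list` there purely as a totality guard.
def control_mechanism (n : Int) (list : List Int) : List Int :=
  if hguard : n < 2 then list
  else
    let list1 := if PySem.Int.mod n 2 ≠ 0 then list ++ [n] else list
    let n1 := if PySem.Int.mod n 2 ≠ 0 then n - 1 else n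
    let list2 := list1 ++ [n1]
    let n2 := PySem.Int.floordiv n1 2
    if n2 = 1 then list2 ++ [n2]
    else control_mechanism n2 list2
termination_by n.toNat
decreasing_by
  simp only [pv_fdiv2, pv_fmod2] at *
  split_ifs at * <;> omega

-- ===== PORT B =====
-- the `while n > 1` loop of Source B, with `out` the accumulator
def pvLoop_B (n : Int) (out : List Int) : List Int :=
  if h : n > 1 then
    pvLoop_B (if PySem.Int.mod n 2 ≠ 0 then n - 1 else PySem.Int.floordiv n 2) (out ++ [n])
  else out
termination_by n.toNat
decreasing_by
  simp only [pv_fdiv2, pv_fmod2] at *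
  split_ifs at * <;> omega

def control_mechanism_alt (n : Int) (list : List Int) : List Int :=
  list ++ (pvLoop_B n [] ++ [1])

-- ===== PRECONDITION & SPEC =====
-- Python A returns only for n ≥ 2; for n ≤ 1 it recurses forever (RecursionError).
def Pre_control_mechanism (n : Int) (list : List Int) : Prop := 2 ≤ n
instance (n : Int) (list : List Int) : Decidable (Pre_control_mechanism n list) := by unfold Pre_control_mechanism; infer_instance
def pvWitness_control_mechanism : Int × List Int := (6, [0])

def Spec_control_mechanism (n : Int) (list : List Int) (out : List Int) : Prop := out = control_mechanism_alt n list
instance (n : Int) (list : List Int) (out : List Int) : Decidable (Spec_control_mechanism n list out) := by unfold Spec_control_mechanism; infer_instance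

-- ===== CLAIM (what is proved, stated in full; the proofs are below) =====
def Claim_equal_control_mechanism : Prop := ∀ (n : Int) (list : List Int), Dom_control_mechanism n list → Pre_control_mechanism n list → Spec_control_mechanism n list (control_mechanism n list)

-- ===== LEMMAS AND PROOFS =====

theorem pvLoop_B_acc (n : Int) (out : List Int) : pvLoop_B n out = out ++ pvLoop_B n [] := by
  by_cases h : n > 1
  · rw [pvLoop_B.eq_def n out, pvLoop_B.eq_def n []]
    simp only [dif_pos h]
    rw [pvLoop_B_acc _ (out ++ [n]), pvLoop_B_acc _ ([] ++ [n])]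
    simp
  · rw [pvLoop_B.eq_def n out, pvLoop_B.eq_def n []]
    simp only [dif_neg h]
    simp
termination_by n.toNat
decreasing_by all_goals
  simp only [pv_fdiv2, pv_fmod2]
  split_ifs <;> omega

theorem control_mechanism_eq (n : Int) (hn : 2 ≤ n) (list : List Int) :
    control_mechanism n list = list ++ (pvLoop_B n [] ++ [1]) := by
  rw [control_mechanism]
  have hlt : ¬ n < 2 := by omega
  rw [dif_neg hlt]
  by_cases hodd : PySem.Int.mod n 2 ≠ 0
  · -- n odd, so n ≥ 3 and n - 1 is even
    have hodd' : n % 2 = 1 := by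
      rw [pv_fmod2] at hodd; omega
    have hge3 : 3 ≤ n := by omega
    simp only [if_pos hodd, pv_fdiv2]
    rw [pvLoop_B.eq_def]
    simp only [dif_pos (show n > 1 by omega), if_pos hodd]
    rw [pvLoop_B_acc, pvLoop_B.eq_def]
    have heven : ¬ PySem.Int.mod (n - 1) 2 ≠ 0 := by
      simp only [pv_fmod2]; omega
    simp only [dif_pos (show n - 1 > 1 by omega), if_neg heven, pv_fdiv2]
    rw [pvLoop_B_acc ((n - 1) / 2)]
    by_cases hstop : (n - 1) / 2 = 1
    · simp only [hstop]
      rw [pvLoop_B.eq_def]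
      simp only [dif_neg (show ¬ (1 : Int) > 1 by omega)]
      simp
    · simp only [if_neg hstop]
      have hm : 2 ≤ (n - 1) / 2 := by omega
      rw [control_mechanism_eq ((n - 1) / 2) hm]
      simp
  · -- n even
    have heven' : n % 2 = 0 := by
      rw [pv_fmod2] at hodd; omega
    simp only [if_neg hodd, pv_fdiv2]
    rw [pvLoop_B.eq_def]
    simp only [dif_pos (show n > 1 by omega), if_neg hodd, pv_fdiv2]
    rw [pvLoop_B_acc]
    by_cases hstop : n / 2 = 1
    · simp only [hstop]
      rw [pvLoop_B.eq_def]
      simp only [dif_neg (show ¬ (1 : Int) > 1 by omega)]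
      simp
    · simp only [if_neg hstop]
      have hm : 2 ≤ n / 2 := by omega
      rw [control_mechanism_eq (n / 2) hm]
      simp
termination_by n.toNat
decreasing_by all_goals omega

-- ===== VERDICT (by name: the statement is the Claim_ definition above) =====
theorem control_mechanism_spec : Claim_equal_control_mechanism := by
  intro n list _ hpre
  unfold Spec_control_mechanism control_mechanism_alt
  exact control_mechanism_eq n hpre list
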